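-- pv_equiv track=rewrite | github.com/MikhailOnuchin/olimp_train | vosh_municipal/2015-16/N2.py | mts
-- ===== SOURCE A (Python) =====
-- def mts(targ, plans):
--     ans = 0
--     if len(plans) == 1:
--         return targ
--     cur_plan = plans[0][0]
--     cur_price = plans[0][1]
--     n = targ // cur_plan
--     ans += cur_price * n
--     targ %= cur_plan
--     if targ != 0:
--         another_price = mts(targ, plans[1:])
--         if another_price < cur_price:
--             ans += another_price
--         else:
--             ans += cur_price
--     return ans
-- ===== SOURCE B (Python) =====
-- def mts(targ, plans):
--     # Recursion eliminated: a forward pass over the plans records (price, n)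
--     # levels on a stack, then a backward fold combines them.
--     if len(plans) == 1:
--         return targ
--     stack = []
--     t = targ
--     i = 0
--     while True:
--         plan, price = plans[i]
--         n, r = divmod(t, plan)
--         if r == 0:
--             result = price * n
--             break
--         stack.append((price, n))
--         if i == len(plans) - 2:
--             result = r
--             break
--         t = r
--         i += 1
--     for price, n in reversed(stack):
--         result = price * n + min(result, price)
--     return result
-- ===== Notes on version B (the rewrite author's own statement) =====
-- stated objective: alternative
-- what changed: Replaced the single-path recursion with an explicit forward loop that records (price, n) levels on a stack plus a backward fold that combines them with the min rule.
-- outside the precondition, e.g. on mts(4, [(2, 1), (0, 5), (3, 2)]): A returns 2, B returns 2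
import Mathlib
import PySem

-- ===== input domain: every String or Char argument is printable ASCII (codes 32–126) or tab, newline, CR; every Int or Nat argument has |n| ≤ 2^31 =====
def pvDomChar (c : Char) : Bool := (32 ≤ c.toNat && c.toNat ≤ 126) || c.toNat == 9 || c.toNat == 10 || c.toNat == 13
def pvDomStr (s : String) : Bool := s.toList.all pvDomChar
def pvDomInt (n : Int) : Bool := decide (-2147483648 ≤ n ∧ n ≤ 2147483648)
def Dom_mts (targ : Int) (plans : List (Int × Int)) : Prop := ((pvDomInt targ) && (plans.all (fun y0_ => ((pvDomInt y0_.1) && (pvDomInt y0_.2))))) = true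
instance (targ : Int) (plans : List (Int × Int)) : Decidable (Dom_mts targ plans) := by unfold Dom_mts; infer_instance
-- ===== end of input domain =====

-- B replaces A's single-path recursion by a forward pass recording (price, n) levels
-- plus a backward fold combining them (objective: alternative decomposition, same cost).

-- ===== PORT A =====
def mts (targ : Int) (plans : List (Int × Int)) : Int :=
  match plans with
  | [] => 0  -- plans[0] raises IndexError in Python; excluded by Pre_mts
  | [_] => targ
  | p :: q :: rest =>
    let cur_plan := p.1
    let cur_price := p.2
    let n := PySem.Int.floordiv targ cur_plan
    let ans := cur_price * n
    let t := PySem.Int.mod targ cur_plan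
    if t ≠ 0 then
      let another_price := mts t (q :: rest)
      if another_price < cur_price then ans + another_price else ans + cur_price
    else ans

-- ===== PORT B =====
-- forward pass of Source B's while-loop: returns (stack of (price, n) levels, seed result)
def mtsAltForward (t : Int) (plans : List (Int × Int)) : List (Int × Int) × Int :=
  match plans with
  | [] => ([], 0)  -- plans[i] raises IndexError in Python; excluded by Pre_mts
  | (plan, price) :: rest =>
    let n := PySem.Int.floordiv t plan
    let r := PySem.Int.mod t plan
    if r = 0 then ([], price * n)
    else if rest.length = 1 then ([(price, n)], r)
    else
      let (st, res) := mtsAltForward r rest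
      ((price, n) :: st, res)

def mts_alt (targ : Int) (plans : List (Int × Int)) : Int :=
  if plans.length = 1 then targ
  else
    let (st, res) := mtsAltForward targ plans
    -- backward fold = Source B's 'for price, n in reversed(stack)'
    st.foldr (fun pn acc => pn.1 * pn.2 + min acc pn.1) res

-- ===== PRECONDITION & SPEC =====
-- Pre_ excludes the empty plan list (plans[0] raises IndexError) and plan lists whose
-- non-last entries contain a zero plan size (a ZeroDivisionError when such an entry is
-- reached; A may still return when an earlier remainder vanishes first — accidental reach).
def Pre_mts (targ : Int) (plans : List (Int × Int)) : Prop :=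
  plans ≠ [] ∧ ∀ p ∈ plans.dropLast, p.1 ≠ 0
instance (targ : Int) (plans : List (Int × Int)) : Decidable (Pre_mts targ plans) := by unfold Pre_mts; infer_instance
def pvWitness_mts : Int × (List (Int × Int)) := (17, [(5, 3), (2, 2), (1, 1)])

def Spec_mts (targ : Int) (plans : List (Int × Int)) (out : Int) : Prop := out = mts_alt targ plans
instance (targ : Int) (plans : List (Int × Int)) (out : Int) : Decidable (Spec_mts targ plans out) := by unfold Spec_mts; infer_instance

-- ===== CLAIM (what is proved, stated in full; the proofs are below) =====
def Claim_equal_mts : Prop := ∀ (targ : Int) (plans : List (Int × Int)), Dom_mts targ plans → Pre_mts targ plans → Spec_mts targ plans (mts targ plans)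

-- ===== LEMMAS AND PROOFS =====

-- On lists of length ≥ 2 the forward pass + backward fold computes A's recursion.
theorem mtsAltForward_fold_eq (plans : List (Int × Int)) :
    ∀ t : Int, 2 ≤ plans.length →
      ((mtsAltForward t plans).1.foldr (fun pn acc => pn.1 * pn.2 + min acc pn.1)
        (mtsAltForward t plans).2) = mts t plans := by
  induction plans with
  | nil => intro t h; simp at h
  | cons p rest ih =>
    intro t h
    obtain ⟨plan, price⟩ := p
    match rest, h with
    | q :: rest', _ =>
      by_cases hr : PySem.Int.mod t plan = 0
      · simp [mtsAltForward, mts, hr]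
      · by_cases h1 : (q :: rest').length = 1
        · -- rest' = []
          match rest', h1 with
          | [], _ =>
            simp [mtsAltForward, mts, hr]
            rcases lt_trichotomy (PySem.Int.mod t plan) price with hlt | heq | hgt
            · simp [hlt, min_eq_left (le_of_lt hlt)]
            · simp [heq]
            · simp [not_lt.mpr (le_of_lt hgt), min_eq_right (le_of_lt hgt)]
        · have h1' : rest' ≠ [] := by intro he; subst he; simp at h1
          have h2 : 2 ≤ (q :: rest').length := by
            cases rest' with
            | nil => exact absurd rfl h1'
            | cons a l => simp
          have ihm := ih (PySem.Int.mod t plan) h2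
          have hstep : mtsAltForward t ((plan, price) :: q :: rest')
              = ((price, PySem.Int.floordiv t plan) :: (mtsAltForward (PySem.Int.mod t plan) (q :: rest')).1,
                 (mtsAltForward (PySem.Int.mod t plan) (q :: rest')).2) := by
            conv_lhs => rw [mtsAltForward]
            rw [if_neg hr, if_neg h1]
          rw [hstep]
          simp only [List.foldr_cons]
          rw [ihm]
          conv_rhs => rw [mts]
          simp only []
          rw [if_pos hr]
          by_cases hlt : mts (PySem.Int.mod t plan) (q :: rest') < price
          · rw [if_pos hlt, min_eq_left (le_of_lt hlt)]
          · rw [if_neg hlt, min_eq_right (not_lt.mp hlt)]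

-- ===== VERDICT (by name: the statement is the Claim_ definition above) =====
theorem mts_spec : Claim_equal_mts := by
  intro targ plans _ hpre
  unfold Spec_mts
  match plans, hpre with
  | [x], _ => simp [mts, mts_alt]
  | p :: q :: rest, _ =>
    have h2 : 2 ≤ (p :: q :: rest).length := by simp
    have := mtsAltForward_fold_eq (p :: q :: rest) targ h2
    simp only [mts_alt]
    have hne : (p :: q :: rest).length ≠ 1 := by simp
    rw [if_neg hne]
    exact this.symm
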